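-- pv_equiv track=rewrite | github.com/LiuPeiP-CS/DataConf | data_utils.py | del_digit
-- ===== SOURCE A (Python) =====
-- def del_digit(sentence_list, sentence_label_list):
--     new_sents = []
--     new_sents_labels = []
--
--     for i_sentence in range(len(sentence_list)):
--         new_sentence = []
--         new_sentence_label = []
--
--         sentence = sentence_list[i_sentence]
--         sentence_label = sentence_label_list[i_sentence]
--         sent_len = len(sentence)
--         token_iter = 0
--         while token_iter < sent_len:
--             token_post = token_iter+1
--             if sentence[token_iter].isdigit():
--                 while token_post < sent_len and sentence[token_post].isdigit():
--                     token_post = token_post + 1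
--             new_sentence.append(sentence[token_iter])
--             new_sentence_label.append(sentence_label[token_iter])
--             token_iter = token_post
--
--         new_sents.append(new_sentence)
--         new_sents_labels.append(new_sentence_label)
--
--     return new_sents, new_sents_labels
-- ===== SOURCE B (Python) =====
-- def _segments(mask):
--     # maximal runs of equal mask value, as (start, end) pairs
--     segs = []
--     n = len(mask)
--     start = 0
--     while start < n:
--         end = start
--         while end < n and mask[end] == mask[start]:
--             end += 1
--         segs.append((start, end))
--         start = end
--     return segs
--
--
-- def del_digit(sentence_list, sentence_label_list):
--     new_sents = []
--     new_sents_labels = []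
--     for k in range(len(sentence_list)):
--         sentence = sentence_list[k]
--         labels = sentence_label_list[k]
--         mask = [tok.isdigit() for tok in sentence]
--         toks = []
--         labs = []
--         for start, end in _segments(mask):
--             if mask[start]:
--                 # a run of digit tokens collapses to its first token
--                 toks.append(sentence[start])
--                 labs.append(labels[start])
--             else:
--                 toks.extend(sentence[start:end])
--                 labs.extend(labels[start:end])
--         new_sents.append(toks)
--         new_sents_labels.append(labs)
--     return new_sents, new_sents_labels
-- ===== Notes on version B (the rewrite author's own statement) =====
-- stated objective: alternative
-- what changed: Replaced A's single pass with an index-skipping inner while-loop by a two-stage run-length algorithm: build a digit mask, segment it into maximal equal runs (start,end), then emit per run the first token for a digit run and the whole slice otherwise.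
import Mathlib
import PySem

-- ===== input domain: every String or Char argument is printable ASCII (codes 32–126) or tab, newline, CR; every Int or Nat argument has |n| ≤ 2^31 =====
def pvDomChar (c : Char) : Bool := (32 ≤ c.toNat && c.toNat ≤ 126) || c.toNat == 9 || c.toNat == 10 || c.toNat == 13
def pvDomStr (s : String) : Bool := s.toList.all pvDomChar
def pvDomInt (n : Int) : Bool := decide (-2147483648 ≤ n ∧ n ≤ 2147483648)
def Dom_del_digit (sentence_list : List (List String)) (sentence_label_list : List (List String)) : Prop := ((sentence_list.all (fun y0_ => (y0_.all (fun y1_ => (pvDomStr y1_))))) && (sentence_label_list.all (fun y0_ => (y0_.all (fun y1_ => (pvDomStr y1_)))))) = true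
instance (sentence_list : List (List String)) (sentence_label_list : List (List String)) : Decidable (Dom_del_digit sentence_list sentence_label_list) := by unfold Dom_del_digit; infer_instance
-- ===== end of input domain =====

-- B replaces A's index-skipping single pass by a two-stage run-length algorithm: a digit
-- mask is segmented into maximal equal runs, then each run is emitted (first token of a
-- digit run, the whole slice otherwise) — an alternative decomposition, same cost.

-- ===== PORT A =====
-- inner 'while token_post < sent_len and sentence[token_post].isdigit(): token_post += 1'
def skipA (s : List String) (p : Nat) : Nat :=
  if p < s.length && PySem.Str.strIsdigit (s.getD p "") then skipA s (p + 1) else p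
termination_by s.length - p
decreasing_by
  rename_i h
  simp only [Bool.and_eq_true, decide_eq_true_eq] at h
  omega

theorem skipA_ge (s : List String) (p : Nat) : p ≤ skipA s p := by
  fun_induction skipA with
  | case1 p h ih => omega
  | case2 p h => omega

-- outer 'while token_iter < sent_len' loop of A, per sentence
def loopA (s l : List String) (i : Nat) : List String × List String :=
  if i < s.length then
    let p := if PySem.Str.strIsdigit (s.getD i "") then skipA s (i + 1) else i + 1
    let rest := loopA s l p
    (s.getD i "" :: rest.1, l.getD i "" :: rest.2)
  else ([], [])
termination_by s.length - i
decreasing_by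
  have := skipA_ge s (i + 1)
  split <;> omega

def del_digit (sentence_list : List (List String)) (sentence_label_list : List (List String)) : List (List String) × List (List String) :=
  (List.range sentence_list.length).foldl
    (fun acc i =>
      let pair := loopA (sentence_list.getD i []) (sentence_label_list.getD i []) 0
      (acc.1 ++ [pair.1], acc.2 ++ [pair.2]))
    ([], [])

-- ===== PORT B =====
-- inner 'while end < n and mask[end] == mask[start]: end += 1' of _segments
def segEnd (mask : List Bool) (v : Bool) (e : Nat) : Nat :=
  if e < mask.length && (mask.getD e false == v) then segEnd mask v (e + 1) else e
termination_by mask.length - e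
decreasing_by
  rename_i h
  simp only [Bool.and_eq_true, decide_eq_true_eq] at h
  omega

theorem segEnd_ge (mask : List Bool) (v : Bool) (e : Nat) : e ≤ segEnd mask v e := by
  fun_induction segEnd with
  | case1 e h ih => omega
  | case2 e h => omega

theorem segEnd_gt (mask : List Bool) (e : Nat) (h : e < mask.length) :
    e < segEnd mask (mask.getD e false) e := by
  rw [segEnd]
  simp only [h, decide_true, beq_self_eq_true, Bool.and_true, if_true]
  have := segEnd_ge mask (mask.getD e false) (e + 1)
  omega

-- outer 'while start < n' loop of _segments
def segsOf (mask : List Bool) (start : Nat) : List (Nat × Nat) :=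
  if h : start < mask.length then
    (start, segEnd mask (mask.getD start false) start) ::
      segsOf mask (segEnd mask (mask.getD start false) start)
  else []
termination_by mask.length - start
decreasing_by
  have := segEnd_gt mask start h
  omega

-- slice t[a:b] of Source B for 0 ≤ a ≤ b (exact there: both indices nonnegative, in order)
def sliceB (t : List String) (a b : Nat) : List String :=
  (t.drop a).take (b - a)

def del_digit_alt (sentence_list : List (List String)) (sentence_label_list : List (List String)) : List (List String) × List (List String) :=
  (List.range sentence_list.length).foldl
    (fun acc k =>
      let s := sentence_list.getD k []
      let l := sentence_label_list.getD k []
      let mask := s.map (fun tok => PySem.Str.strIsdigit tok)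
      let pair := (segsOf mask 0).foldl
        (fun (p : List String × List String) seg =>
          if mask.getD seg.1 false then
            (p.1 ++ [s.getD seg.1 ""], p.2 ++ [l.getD seg.1 ""])
          else
            (p.1 ++ sliceB s seg.1 seg.2, p.2 ++ sliceB l seg.1 seg.2))
        ([], [])
      (acc.1 ++ [pair.1], acc.2 ++ [pair.2]))
    ([], [])

-- ===== PRECONDITION & SPEC =====
-- index i of sentence s survives the collapse (not a digit, or starts a digit run)
def keptIdx (s : List String) (i : Nat) : Bool :=
  !PySem.Str.strIsdigit (s.getD i "") || i == 0 || !PySem.Str.strIsdigit (s.getD (i - 1) "")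

-- Pre_ excludes exactly the inputs on which Python A raises IndexError: a label list shorter
-- than the sentence list, or a per-sentence label list missing a kept position A reads.
def Pre_del_digit (sentence_list : List (List String)) (sentence_label_list : List (List String)) : Prop :=
  sentence_list.length ≤ sentence_label_list.length ∧
  ∀ p ∈ sentence_list.zip sentence_label_list, ∀ i < p.1.length,
    keptIdx p.1 i = true → i < p.2.length
instance (sentence_list : List (List String)) (sentence_label_list : List (List String)) : Decidable (Pre_del_digit sentence_list sentence_label_list) := by unfold Pre_del_digit; infer_instance

def pvWitness_del_digit : List (List String) × List (List String) :=
  ([["12", "34", "ab", "7", "+5"], []], [["A", "B", "C", "D", "E"], []])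

def Spec_del_digit (sentence_list : List (List String)) (sentence_label_list : List (List String)) (out : List (List String) × List (List String)) : Prop := out = del_digit_alt sentence_list sentence_label_list
instance (sentence_list : List (List String)) (sentence_label_list : List (List String)) (out : List (List String) × List (List String)) : Decidable (Spec_del_digit sentence_list sentence_label_list out) := by unfold Spec_del_digit; infer_instance

-- ===== CLAIM (what is proved, stated in full; the proofs are below) =====
def Claim_equal_del_digit : Prop := ∀ (sentence_list : List (List String)) (sentence_label_list : List (List String)), Dom_del_digit sentence_list sentence_label_list → Pre_del_digit sentence_list sentence_label_list → Spec_del_digit sentence_list sentence_label_list (del_digit sentence_list sentence_label_list)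

-- ===== LEMMAS AND PROOFS =====

-- ---- A side: A's loop emits the kept indices ----

theorem skipA_le (s : List String) (p : Nat) (h : p ≤ s.length) : skipA s p ≤ s.length := by
  fun_induction skipA with
  | case1 p hc ih =>
      simp only [Bool.and_eq_true, decide_eq_true_eq] at hc
      exact ih (by omega)
  | case2 p hc => exact h

theorem skipA_digits (s : List String) (p j : Nat) (h1 : p ≤ j) (h2 : j < skipA s p) :
    PySem.Str.strIsdigit (s.getD j "") = true := by
  fun_induction skipA with
  | case1 p hc ih =>
      rcases Nat.eq_or_lt_of_le h1 with he | hl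
      · subst he; exact ((Bool.and_eq_true _ _).mp hc).2
      · exact ih hl h2
  | case2 p hc => omega

theorem skipA_stop (s : List String) (p : Nat) (h : skipA s p < s.length) :
    PySem.Str.strIsdigit (s.getD (skipA s p) "") = false := by
  fun_induction skipA with
  | case1 p hc ih => exact ih h
  | case2 p hc =>
      simpa [decide_eq_true_eq, h] using hc

-- per-sentence invariant: from a kept entry point, A's loop emits exactly the kept suffix
theorem loopA_eq (s l : List String) (i : Nat)
    (hinv : i < s.length → keptIdx s i = true) :
    loopA s l i =
      (((List.range' i (s.length - i)).filter (fun j => keptIdx s j)).map (fun j => s.getD j ""),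
       ((List.range' i (s.length - i)).filter (fun j => keptIdx s j)).map (fun j => l.getD j "")) := by
  fun_induction loopA with
  | case2 i h =>
      have h0 : s.length - i = 0 := by omega
      simp [h0]
  | case1 i h p rest ih =>
      have hp : p = if PySem.Str.strIsdigit (s.getD i "") = true then skipA s (i + 1) else i + 1 := by
        simp only [p]
        rw [dite_eq_ite]
      have hgt : i < p := by
        rw [hp]
        have := skipA_ge s (i + 1)
        split <;> omega
      have hle : p ≤ s.length := by
        rw [hp]
        have := skipA_le s (i + 1) (by omega)
        split <;> omega
      have hdrop : ∀ j, i < j → j < p → keptIdx s j = false := by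
        intro j hj1 hj2
        rw [hp] at hj2
        by_cases hd : PySem.Str.strIsdigit (s.getD i "") = true
        · rw [if_pos hd] at hj2
          have hdj : PySem.Str.strIsdigit (s.getD j "") = true :=
            skipA_digits s (i + 1) j (by omega) hj2
          have hdj1 : PySem.Str.strIsdigit (s.getD (j - 1) "") = true := by
            rcases Nat.eq_or_lt_of_le (Nat.succ_le_of_lt hj1) with he | hl
            · rw [show j - 1 = i by omega]; exact hd
            · exact skipA_digits s (i + 1) (j - 1) (by omega) (by omega)
          simp only [keptIdx, Bool.or_eq_false_iff, Bool.not_eq_false', beq_eq_false_iff_ne]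
          exact ⟨⟨hdj, by omega⟩, hdj1⟩
        · rw [if_neg hd] at hj2; omega
      have hnext : p < s.length → keptIdx s p = true := by
        intro hpl
        rw [hp] at hpl ⊢
        by_cases hd : PySem.Str.strIsdigit (s.getD i "") = true
        · rw [if_pos hd] at hpl ⊢
          simp only [keptIdx, Bool.or_eq_true, Bool.not_eq_true']
          exact Or.inl (Or.inl (skipA_stop s (i + 1) hpl))
        · rw [if_neg hd] at hpl ⊢
          simp only [keptIdx, Bool.or_eq_true, Bool.not_eq_true', show i + 1 - 1 = i from rfl]
          exact Or.inr (by simpa using hd)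
      have hki : keptIdx s i = true := hinv h
      have hsplit : List.range' i (s.length - i) =
          i :: (List.range' (i + 1) (p - (i + 1)) ++ List.range' p (s.length - p)) := by
        rw [show s.length - i = (p - (i + 1) + (s.length - p)) + 1 by omega]
        rw [List.range'_succ, ← List.range'_append_1,
          show i + 1 + (p - (i + 1)) = p by omega]
      have hmid : (List.range' (i + 1) (p - (i + 1))).filter (fun j => keptIdx s j) = [] := by
        rw [List.filter_eq_nil_iff]
        intro j hj
        have := List.mem_range'_1.mp hj
        simp [hdrop j (by omega) (by omega)]
      rw [hsplit]
      simp only [List.filter_cons, hki, if_pos, List.filter_append, hmid, List.nil_append,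
        List.map_cons]
      simp only [rest]
      rw [ih hnext]

-- ---- B side: the run segmentation emits the kept indices ----

theorem mask_getD (s : List String) (j : Nat) (h : j < s.length) :
    (s.map (fun tok => PySem.Str.strIsdigit tok)).getD j false
      = PySem.Str.strIsdigit (s.getD j "") := by
  rw [List.getD_eq_getElem _ _ (by simpa using h), List.getD_eq_getElem _ _ h]
  simp

theorem segEnd_le (mask : List Bool) (v : Bool) (e : Nat) (h : e ≤ mask.length) :
    segEnd mask v e ≤ mask.length := by
  fun_induction segEnd with
  | case1 e hc ih =>
      simp only [Bool.and_eq_true, decide_eq_true_eq] at hc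
      exact ih (by omega)
  | case2 e hc => exact h

theorem segEnd_run (mask : List Bool) (v : Bool) (e j : Nat) (h1 : e ≤ j)
    (h2 : j < segEnd mask v e) : mask.getD j false = v := by
  fun_induction segEnd with
  | case1 e hc ih =>
      rcases Nat.eq_or_lt_of_le h1 with he | hl
      · subst he
        simpa using ((Bool.and_eq_true _ _).mp hc).2
      · exact ih hl h2
  | case2 e hc => omega

theorem segEnd_stop (mask : List Bool) (v : Bool) (e : Nat)
    (h : segEnd mask v e < mask.length) : mask.getD (segEnd mask v e) false ≠ v := by
  fun_induction segEnd with
  | case1 e hc ih => exact ih h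
  | case2 e hc =>
      simp only [Bool.and_eq_true, decide_eq_true_eq, beq_iff_eq] at hc
      intro hv
      exact hc ⟨h, hv⟩

-- a slice of a long-enough list is the map of getD over the index range
theorem sliceB_eq_map (t : List String) (a b : Nat) (hab : a ≤ b) (hb : b ≤ t.length) :
    sliceB t a b = (List.range' a (b - a)).map (fun j => t.getD j "") := by
  apply List.ext_getElem
  · simp [sliceB]; omega
  · intro n h1 h2
    have hn : a + n < t.length := by
      simp [sliceB] at h1; omega
    simp only [sliceB, List.getElem_take, List.getElem_drop, List.getElem_map,
      List.getElem_range', one_mul]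
    rw [List.getD_eq_getElem t "" hn]

-- a fold appending a per-segment chunk to each component is a pair of flatMaps
theorem foldl_pair_flat (f g : Nat × Nat → List String) (r : List (Nat × Nat))
    (a b : List String) :
    r.foldl (fun (p : List String × List String) seg => (p.1 ++ f seg, p.2 ++ g seg)) (a, b)
      = (a ++ r.flatMap f, b ++ r.flatMap g) := by
  induction r generalizing a b with
  | nil => simp
  | cons x xs ih => simp [ih]

-- per-sentence invariant for B: the segments from a kept boundary emit the kept suffix
theorem segsOf_flat (s t : List String) (start : Nat)
    (hT : ∀ j < s.length, keptIdx s j = true → j < t.length)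
    (hb : start < s.length → keptIdx s start = true) :
    ((segsOf (s.map (fun tok => PySem.Str.strIsdigit tok)) start).flatMap
        (fun seg =>
          if (s.map (fun tok => PySem.Str.strIsdigit tok)).getD seg.1 false then
            [t.getD seg.1 ""] else sliceB t seg.1 seg.2))
      = ((List.range' start (s.length - start)).filter (fun j => keptIdx s j)).map
          (fun j => t.getD j "") := by
  fun_induction segsOf with
  | case2 start h =>
      have h0 : s.length - start = 0 := by simp at h; omega
      simp [h0]
  | case1 start h ih =>
      have hsl : start < s.length := by simpa using h
      set mask := s.map (fun tok => PySem.Str.strIsdigit tok) with hm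
      set e := segEnd mask (mask.getD start false) start with he
      have hgt : start < e := segEnd_gt mask start h
      have hml : mask.length = s.length := by simp [hm]
      have hle : e ≤ s.length := by
        rw [← hml]
        exact segEnd_le mask (mask.getD start false) start (Nat.le_of_lt h)
      have hrun : ∀ j, start ≤ j → j < e → mask.getD j false = mask.getD start false :=
        fun j h1 h2 => segEnd_run mask (mask.getD start false) start j h1 h2
      have hstop : e < s.length → mask.getD e false ≠ mask.getD start false := by
        intro hel
        exact segEnd_stop mask (mask.getD start false) start (by rw [hml]; exact hel)
      have hki : keptIdx s start = true := hb hsl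
      -- split the index range at e
      have hsplit : List.range' start (s.length - start) =
          List.range' start (e - start) ++ List.range' e (s.length - e) := by
        rw [show s.length - start = (e - start) + (s.length - e) by omega,
          ← List.range'_append_1, show start + (e - start) = e by omega]
      -- next boundary is kept again
      have hnext : e < s.length → keptIdx s e = true := by
        intro hel
        by_cases hd : PySem.Str.strIsdigit (s.getD e "") = true
        · have hv : mask.getD start false = false := by
            have h1 := hstop hel
            rw [mask_getD s e hel] at h1
            cases hv : mask.getD start false
            · rfl
            · exact absurd (by rw [hd, hv]) h1
          have hprev : PySem.Str.strIsdigit (s.getD (e - 1) "") = false := by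
            have := hrun (e - 1) (by omega) (by omega)
            rw [mask_getD s (e - 1) (by omega), hv] at this
            exact this
          simp only [keptIdx, Bool.or_eq_true, Bool.not_eq_true']
          exact Or.inr hprev
        · simp [keptIdx, Bool.not_eq_true] at hd ⊢
          exact Or.inl (Or.inl hd)
      rw [List.flatMap_cons, ih hnext, hsplit, List.filter_append, List.map_append]
      congr 1
      -- the first segment's chunk equals the filtered first range
      by_cases hd : mask.getD start false = true
      · -- digit run: only `start` is kept in [start, e)
        have hds : PySem.Str.strIsdigit (s.getD start "") = true := by
          rwa [mask_getD s start hsl] at hd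
        have hdropped : ∀ j, start < j → j < e → keptIdx s j = false := by
          intro j h1 h2
          have hj : PySem.Str.strIsdigit (s.getD j "") = true := by
            have := hrun j (by omega) h2
            rwa [mask_getD s j (by omega), hd] at this
          have hj1 : PySem.Str.strIsdigit (s.getD (j - 1) "") = true := by
            have := hrun (j - 1) (by omega) (by omega)
            rwa [mask_getD s (j - 1) (by omega), hd] at this
          simp only [keptIdx, Bool.or_eq_false_iff, Bool.not_eq_false', beq_eq_false_iff_ne]
          exact ⟨⟨hj, by omega⟩, hj1⟩
        have hr : List.range' start (e - start) =
            start :: List.range' (start + 1) (e - start - 1) := by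
          obtain ⟨m, hm2⟩ : ∃ m, e - start = m + 1 := ⟨e - start - 1, by omega⟩
          rw [hm2, List.range'_succ]
          simp
        rw [if_pos hd, hr]
        simp only [List.filter_cons, hki, if_pos, List.map_cons]
        have : (List.range' (start + 1) (e - start - 1)).filter (fun j => keptIdx s j) = [] := by
          rw [List.filter_eq_nil_iff]
          intro j hj
          have := List.mem_range'_1.mp hj
          simp [hdropped j (by omega) (by omega)]
        simp [this]
      · -- non-digit run: everything in [start, e) is kept
        have hallkept : ∀ j, start ≤ j → j < e → keptIdx s j = true := by
          intro j h1 h2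
          have : PySem.Str.strIsdigit (s.getD j "") = false := by
            have := hrun j h1 h2
            rw [mask_getD s j (by omega)] at this
            rw [this]
            exact Bool.not_eq_true _ ▸ (by simpa using hd)
          simp only [keptIdx, Bool.or_eq_true, Bool.not_eq_true']
          exact Or.inl (Or.inl this)
        have hfe : (List.range' start (e - start)).filter (fun j => keptIdx s j)
            = List.range' start (e - start) := by
          rw [List.filter_eq_self]
          intro j hj
          have := List.mem_range'_1.mp hj
          simpa using hallkept j (by omega) (by omega)
        have het : e ≤ t.length := by
          rcases Nat.eq_zero_or_pos e with h0 | hpos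
          · omega
          · have := hT (e - 1) (by omega) (hallkept (e - 1) (by omega) (by omega))
            omega
        rw [if_neg hd, hfe, sliceB_eq_map t start e (by omega) het]

-- a fold appending one element to each component per step is a pair of maps
theorem foldl_pair_append (f g : Nat → List String) (r : List Nat) (a b : List (List String)) :
    r.foldl (fun acc i => (acc.1 ++ [f i], acc.2 ++ [g i])) (a, b) = (a ++ r.map f, b ++ r.map g) := by
  induction r generalizing a b with
  | nil => simp
  | cons x xs ih => simp [ih]

theorem del_digit_eq (sl ll : List (List String)) (hpre : Pre_del_digit sl ll) :
    del_digit sl ll = del_digit_alt sl ll := by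
  obtain ⟨hlen, hlab⟩ := hpre
  simp only [del_digit, del_digit_alt]
  rw [foldl_pair_append (fun i => (loopA (sl.getD i []) (ll.getD i []) 0).1)
      (fun i => (loopA (sl.getD i []) (ll.getD i []) 0).2)]
  rw [foldl_pair_append
      (fun k =>
        ((segsOf ((sl.getD k []).map (fun tok => PySem.Str.strIsdigit tok)) 0).foldl
          (fun (p : List String × List String) seg =>
            if ((sl.getD k []).map (fun tok => PySem.Str.strIsdigit tok)).getD seg.1 false then
              (p.1 ++ [(sl.getD k []).getD seg.1 ""], p.2 ++ [(ll.getD k []).getD seg.1 ""])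
            else
              (p.1 ++ sliceB (sl.getD k []) seg.1 seg.2, p.2 ++ sliceB (ll.getD k []) seg.1 seg.2))
          ([], [])).1)
      (fun k =>
        ((segsOf ((sl.getD k []).map (fun tok => PySem.Str.strIsdigit tok)) 0).foldl
          (fun (p : List String × List String) seg =>
            if ((sl.getD k []).map (fun tok => PySem.Str.strIsdigit tok)).getD seg.1 false then
              (p.1 ++ [(sl.getD k []).getD seg.1 ""], p.2 ++ [(ll.getD k []).getD seg.1 ""])
            else
              (p.1 ++ sliceB (sl.getD k []) seg.1 seg.2, p.2 ++ sliceB (ll.getD k []) seg.1 seg.2))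
          ([], [])).2)]
  rw [Prod.mk.injEq]
  have key : ∀ n < sl.length,
      loopA (sl.getD n []) (ll.getD n []) 0 =
      (segsOf ((sl.getD n []).map (fun tok => PySem.Str.strIsdigit tok)) 0).foldl
        (fun (p : List String × List String) seg =>
          if ((sl.getD n []).map (fun tok => PySem.Str.strIsdigit tok)).getD seg.1 false then
            (p.1 ++ [(sl.getD n []).getD seg.1 ""], p.2 ++ [(ll.getD n []).getD seg.1 ""])
          else
            (p.1 ++ sliceB (sl.getD n []) seg.1 seg.2, p.2 ++ sliceB (ll.getD n []) seg.1 seg.2))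
        ([], []) := by
    intro n hn
    have hn' : n < ll.length := by omega
    have hT : ∀ j < (sl.getD n []).length, keptIdx (sl.getD n []) j = true →
        j < (ll.getD n []).length := by
      intro j hj hk
      have hmem : (sl.getD n [], ll.getD n []) ∈ sl.zip ll := by
        rw [List.getD_eq_getElem sl [] hn, List.getD_eq_getElem ll [] hn']
        exact List.getElem_zip (l := sl) (l' := ll) (i := n)
          (h := by rw [List.length_zip]; omega) ▸
          List.getElem_mem (l := sl.zip ll) (by rw [List.length_zip]; omega)
      exact hlab _ hmem j hj hk
    have hfun :
        (fun (p : List String × List String) seg =>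
          if ((sl.getD n []).map (fun tok => PySem.Str.strIsdigit tok)).getD seg.1 false then
            (p.1 ++ [(sl.getD n []).getD seg.1 ""], p.2 ++ [(ll.getD n []).getD seg.1 ""])
          else
            (p.1 ++ sliceB (sl.getD n []) seg.1 seg.2, p.2 ++ sliceB (ll.getD n []) seg.1 seg.2))
        = (fun (p : List String × List String) (seg : Nat × Nat) =>
            (p.1 ++ (if ((sl.getD n []).map (fun tok => PySem.Str.strIsdigit tok)).getD seg.1 false then
                [(sl.getD n []).getD seg.1 ""] else sliceB (sl.getD n []) seg.1 seg.2),
             p.2 ++ (if ((sl.getD n []).map (fun tok => PySem.Str.strIsdigit tok)).getD seg.1 false then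
                [(ll.getD n []).getD seg.1 ""] else sliceB (ll.getD n []) seg.1 seg.2))) := by
      funext p seg
      split <;> rfl
    rw [hfun]
    rw [foldl_pair_flat
        (fun seg =>
          if ((sl.getD n []).map (fun tok => PySem.Str.strIsdigit tok)).getD seg.1 false then
            [(sl.getD n []).getD seg.1 ""] else sliceB (sl.getD n []) seg.1 seg.2)
        (fun seg =>
          if ((sl.getD n []).map (fun tok => PySem.Str.strIsdigit tok)).getD seg.1 false then
            [(ll.getD n []).getD seg.1 ""] else sliceB (ll.getD n []) seg.1 seg.2)]
    · rw [loopA_eq _ _ 0 (fun _ => by simp [keptIdx]),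
        segsOf_flat (sl.getD n []) (sl.getD n []) 0 (fun j hj _ => hj) (fun _ => by simp [keptIdx]),
        segsOf_flat (sl.getD n []) (ll.getD n []) 0 hT (fun _ => by simp [keptIdx])]
      simp
  constructor <;>
  · apply List.ext_getElem
    · simp
    · intro n h1 h2
      simp only [List.getElem_map, List.getElem_range, List.nil_append] at *
      rw [key n (by simpa using h2)]

-- ===== VERDICT (by name: the statement is the Claim_ definition above) =====
theorem del_digit_spec : Claim_equal_del_digit := by
  intro sl ll _ hpre
  unfold Spec_del_digit
  exact del_digit_eq sl ll hpre
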